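-- pv_equiv track=rewrite | github.com/Luucas7/algorithmes-automates | Graphes.py | liremot
-- ===== SOURCE A (Python) =====
-- def lirelettre(T, E, a):
--     atteignables = []
--
--     for transition in T:
--         # Si la transition est de la forme (e1, a, e2) avec e1 dans E et a égal à la lettre a
--         if type(E) == int and transition[0] == E and transition[1] == a:
--             atteignables.append(transition[2])
--         elif type(E) == list and transition[0] in E and transition[1] == a:
--             atteignables.append(transition[2])
--     return list(set(atteignables))
--
-- def liremot(T, E, m):
--     if len(m) == 0:
--         # Cas d'arrêt : on a fini de lire le mot
--         return E
--     else:
--         # Récursion : on lit la première lettre du mot et on passe à la suite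
--         debut = m[0]
--         fin = m[1:]
--         atteints = lirelettre(T, E, debut)
--         return liremot(T, atteints, fin)
-- ===== SOURCE B (Python) =====
-- def lirelettre(T, E, a):
--     atteignables = []
--
--     for transition in T:
--         if type(E) == int and transition[0] == E and transition[1] == a:
--             atteignables.append(transition[2])
--         elif type(E) == list and transition[0] in E and transition[1] == a:
--             atteignables.append(transition[2])
--     return list(set(atteignables))
--
-- def liremot(T, E, m):
--     etats = E
--     for lettre in m:
--         etats = lirelettre(T, etats, lettre)
--     return etats
-- ===== Notes on version B (the rewrite author's own statement) =====
-- stated objective: simpler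
-- what changed: liremot is rewritten as an iterative left-to-right loop with an accumulator over the word's letters instead of recursing on m[1:] with repeated slicing; lirelettre is unchanged.
import Mathlib
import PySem

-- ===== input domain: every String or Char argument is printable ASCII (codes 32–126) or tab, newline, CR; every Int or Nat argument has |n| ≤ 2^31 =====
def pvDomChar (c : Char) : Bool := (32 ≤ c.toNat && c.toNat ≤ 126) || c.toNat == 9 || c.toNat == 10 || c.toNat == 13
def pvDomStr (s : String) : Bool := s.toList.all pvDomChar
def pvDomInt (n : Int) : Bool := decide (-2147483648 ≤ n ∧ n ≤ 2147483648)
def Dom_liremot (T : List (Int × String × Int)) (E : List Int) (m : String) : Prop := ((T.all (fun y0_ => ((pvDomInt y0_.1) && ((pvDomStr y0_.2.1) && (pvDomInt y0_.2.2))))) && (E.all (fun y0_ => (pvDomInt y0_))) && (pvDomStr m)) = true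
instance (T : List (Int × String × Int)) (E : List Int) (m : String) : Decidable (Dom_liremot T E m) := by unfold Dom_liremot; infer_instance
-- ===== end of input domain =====

-- B rewrites liremot as an iterative fold over the letters instead of recursing on m[1:]; lirelettre is unchanged (shared helper).
-- The output list comes from Python's list(set(...)): it is compared as a set; the port uses first-occurrence order (PySem.Set.ofList).

-- ===== PORT A =====
-- shared helper (identical in Source A and Source B): collect targets of transitions (e1, a, e2) with e1 ∈ E, then list(set(...)).
-- (the 'type(E) == int' branch of the Python is unreachable here: E is a list of ints)
def lirelettre (T : List (Int × String × Int)) (E : List Int) (a : String) : List Int :=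
  PySem.Set.ofList
    (T.foldl (fun atteignables t =>
      if decide (t.1 ∈ E) && (t.2.1 == a) then atteignables ++ [t.2.2] else atteignables) [])

-- recursion on the word: m[0] is a 1-char string, m[1:] the rest
def liremotChars (T : List (Int × String × Int)) (E : List Int) : List Char → List Int
  | [] => E
  | c :: rest => liremotChars T (lirelettre T E (String.mk [c])) rest

def liremot (T : List (Int × String × Int)) (E : List Int) (m : String) : List Int :=
  liremotChars T E m.toList

-- ===== PORT B =====
-- iterative: etats = E; for lettre in m: etats = lirelettre(T, etats, lettre); return etats
def liremot_alt (T : List (Int × String × Int)) (E : List Int) (m : String) : List Int :=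
  m.toList.foldl (fun etats lettre => lirelettre T etats (String.mk [lettre])) E

-- ===== PRECONDITION & SPEC =====
def Spec_liremot (T : List (Int × String × Int)) (E : List Int) (m : String) (out : List Int) : Prop := out = liremot_alt T E m
instance (T : List (Int × String × Int)) (E : List Int) (m : String) (out : List Int) : Decidable (Spec_liremot T E m out) := by unfold Spec_liremot; infer_instance

-- ===== CLAIM (what is proved, stated in full; the proofs are below) =====
def Claim_equal_liremot : Prop := ∀ (T : List (Int × String × Int)) (E : List Int) (m : String), Dom_liremot T E m → Spec_liremot T E m (liremot T E m)

-- ===== LEMMAS AND PROOFS =====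
theorem liremotChars_eq_foldl (T : List (Int × String × Int)) (cs : List Char) (E : List Int) :
    liremotChars T E cs = cs.foldl (fun etats lettre => lirelettre T etats (String.mk [lettre])) E := by
  induction cs generalizing E with
  | nil => rfl
  | cons c rest ih => simp [liremotChars, List.foldl, ih]

-- ===== VERDICT (by name: the statement is the Claim_ definition above) =====
theorem liremot_spec : Claim_equal_liremot := by
  intro T E m _
  unfold Spec_liremot liremot liremot_alt
  exact liremotChars_eq_foldl T m.toList E
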